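-- pv_equiv track=rewrite | github.com/f65gw6yvpz-maker/API | APi.py | build_group_text
-- ===== SOURCE A (Python) =====
-- from typing import Optional, List, Dict, Tuple
--
-- def build_group_text(rows: List[Dict[str,str]]) -> str:
--     parts = []
--     for r in rows:
--         for k, v in r.items():
--             if v is None:
--                 continue
--             v = str(v).strip()
--             if not v:
--                 continue
--             parts.append(f"{k}: {v}")
--     return "\n".join(parts)
-- ===== SOURCE B (Python) =====
-- from typing import List, Dict
--
--
-- def _glue(a: str, b: str) -> str:
--     if not a:
--         return b
--     if not b:
--         return a
--     return a + "\n" + b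
--
--
-- def _row_text(r: Dict[str, str]) -> str:
--     t = ""
--     for k, v in r.items():
--         if v is None:
--             continue
--         s = str(v).strip()
--         if s:
--             t = _glue(t, f"{k}: {s}")
--     return t
--
--
-- def build_group_text(rows: List[Dict[str, str]]) -> str:
--     n = len(rows)
--     if n == 0:
--         return ""
--     if n == 1:
--         return _row_text(rows[0])
--     mid = n // 2
--     return _glue(build_group_text(rows[:mid]), build_group_text(rows[mid:]))
-- ===== Notes on version B (the rewrite author's own statement) =====
-- stated objective: alternative
-- what changed: B is a divide-and-conquer: it splits the row list in half, recursively builds each half's text and combines the two texts with an associative glue that inserts a newline only between non-empty sides (the base case folds one row with the same glue), instead of A's flat accumulator list followed by a single '\n'.join.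
import Mathlib
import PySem

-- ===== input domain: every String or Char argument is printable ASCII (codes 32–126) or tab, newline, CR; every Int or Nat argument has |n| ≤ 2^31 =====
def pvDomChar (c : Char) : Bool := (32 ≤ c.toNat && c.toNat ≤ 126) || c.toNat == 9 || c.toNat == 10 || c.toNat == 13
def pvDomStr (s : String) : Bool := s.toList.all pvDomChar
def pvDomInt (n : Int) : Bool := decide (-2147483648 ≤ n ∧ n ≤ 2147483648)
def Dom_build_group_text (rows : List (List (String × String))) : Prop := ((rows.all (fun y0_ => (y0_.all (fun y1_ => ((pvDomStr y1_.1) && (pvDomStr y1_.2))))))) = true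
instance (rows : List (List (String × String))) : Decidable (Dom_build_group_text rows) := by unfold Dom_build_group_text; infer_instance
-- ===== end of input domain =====

-- B builds the text by divide-and-conquer (split rows in half, glue the two halves' texts
-- with a newline only between non-empty sides) instead of A's flat list + join; objective: alternative.


-- ===== PORT A =====
-- A: one flat `parts` accumulator over all rows and entries, then a single join.
-- (the `v is None` guard of A is vacuous here: values are typed str)
def build_group_text (rows : List (List (String × String))) : String :=
  let parts := rows.foldl (fun parts r =>
    r.foldl (fun parts kv =>
      let v := PySem.Str.strip kv.2
      if v = "" then parts else parts ++ [kv.1 ++ ": " ++ v]) parts) []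
  PySem.Str.join "\n" parts

-- ===== PORT B =====
-- B helper: glue two texts, newline only between two non-empty sides
def pvGlue (a b : String) : String :=
  if a = "" then b else if b = "" then a else a ++ "\n" ++ b

-- B helper: one row's text, folded with the same glue
def pvRowText (r : List (String × String)) : String :=
  r.foldl (fun t kv =>
    let s := PySem.Str.strip kv.2
    if s = "" then t else pvGlue t (kv.1 ++ ": " ++ s)) ""

def build_group_text_alt (rows : List (List (String × String))) : String :=
  match rows with
  | [] => ""
  | [r] => pvRowText r
  | a :: b :: t =>
    let rs := a :: b :: t
    let mid := rs.length / 2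
    pvGlue (build_group_text_alt (rs.take mid)) (build_group_text_alt (rs.drop mid))
termination_by rows.length
decreasing_by
  · simp only [List.length_take, List.length_cons]; omega
  · simp only [List.length_drop, List.length_cons]; omega

-- ===== PRECONDITION & SPEC =====
def Spec_build_group_text (rows : List (List (String × String))) (out : String) : Prop := out = build_group_text_alt rows
instance (rows : List (List (String × String))) (out : String) : Decidable (Spec_build_group_text rows out) := by unfold Spec_build_group_text; infer_instance

-- ===== CLAIM (what is proved, stated in full; the proofs are below) =====
def Claim_equal_build_group_text : Prop := ∀ (rows : List (List (String × String))), Dom_build_group_text rows → Spec_build_group_text rows (build_group_text rows)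

-- ===== LEMMAS AND PROOFS =====

-- entries of one row, as a filter+map
def pvEntries (r : List (String × String)) : List String :=
  (r.filter (fun kv => decide (PySem.Str.strip kv.2 ≠ ""))).map
    (fun kv => kv.1 ++ ": " ++ PySem.Str.strip kv.2)

-- the glue monoid: fold of glue over a list of strings
def pvM (l : List String) : String := l.foldr pvGlue ""

theorem pv_append_ne (a b : String) : a ++ "\n" ++ b ≠ "" := by
  intro h
  have := congrArg String.toList h
  simp [String.toList_append] at this

theorem pvGlue_empty_right (a : String) : pvGlue a "" = a := by
  unfold pvGlue; split_ifs with h h2 <;> simp_all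

theorem pvGlue_ne_left (a b : String) (ha : a ≠ "") : pvGlue a b ≠ "" := by
  unfold pvGlue
  split_ifs with h1 h2
  · exact absurd h1 ha
  · exact ha
  · exact pv_append_ne a b

theorem pvGlue_assoc (a b c : String) : pvGlue (pvGlue a b) c = pvGlue a (pvGlue b c) := by
  unfold pvGlue
  by_cases ha : a = "" <;> by_cases hb : b = "" <;> by_cases hc : c = "" <;>
    simp [ha, hb, hc, String.append_assoc]

theorem pv_foldr_glue (xs : List String) (c : String) :
    xs.foldr pvGlue c = pvGlue (pvM xs) c := by
  induction xs with
  | nil => simp [pvM, pvGlue]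
  | cons x t ih => simp only [pvM, List.foldr_cons] at *; rw [ih, pvGlue_assoc]

theorem pvM_append (xs ys : List String) : pvM (xs ++ ys) = pvGlue (pvM xs) (pvM ys) := by
  unfold pvM
  rw [List.foldr_append, pv_foldr_glue]
  simp [pvM]

theorem pv_rowText (r : List (String × String)) (acc : String) :
    r.foldl (fun t kv =>
      let s := PySem.Str.strip kv.2
      if s = "" then t else pvGlue t (kv.1 ++ ": " ++ s)) acc
      = pvGlue acc (pvM (pvEntries r)) := by
  induction r generalizing acc with
  | nil => simp [pvEntries, pvM, pvGlue_empty_right]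
  | cons kv t ih =>
      by_cases h : PySem.Str.strip kv.2 = ""
      · simp [pvEntries, h, ih]
      · have hE : pvEntries (kv :: t) = (kv.1 ++ ": " ++ PySem.Str.strip kv.2) :: pvEntries t := by
          simp [pvEntries, h]
        have hM : ∀ (x : String) (l : List String), pvM (x :: l) = pvGlue x (pvM l) := fun _ _ => rfl
        simp only [List.foldl_cons]
        rw [if_neg h, ih, hE, hM, ← pvGlue_assoc]

theorem pv_inner_fold (r : List (String × String)) (acc : List String) :
    r.foldl (fun parts kv =>
      let v := PySem.Str.strip kv.2
      if v = "" then parts else parts ++ [kv.1 ++ ": " ++ v]) acc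
      = acc ++ pvEntries r := by
  induction r generalizing acc with
  | nil => simp [pvEntries]
  | cons kv t ih =>
      by_cases h : PySem.Str.strip kv.2 = "" <;>
        simp [pvEntries, ih, h] at *

theorem pv_outer_fold (rows : List (List (String × String))) (acc : List String) :
    rows.foldl (fun parts r =>
      r.foldl (fun parts kv =>
        let v := PySem.Str.strip kv.2
        if v = "" then parts else parts ++ [kv.1 ++ ": " ++ v]) parts) acc
      = acc ++ (rows.map pvEntries).flatten := by
  induction rows generalizing acc with
  | nil => simp
  | cons r t ih => simp [pv_inner_fold, ih]

theorem pv_entry_ne (kv : String × String) : kv.1 ++ ": " ++ PySem.Str.strip kv.2 ≠ "" := by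
  intro h
  have := congrArg String.toList h
  simp [String.toList_append] at this

theorem pv_entries_ne (r : List (String × String)) : ∀ s ∈ pvEntries r, s ≠ "" := by
  intro s hs
  rcases List.mem_map.mp hs with ⟨kv, _, rfl⟩
  exact pv_entry_ne kv

-- joining a list of non-empty strings with "\n" is the glue fold
theorem pv_join_eq_M (l : List String) (h : ∀ s ∈ l, s ≠ "") :
    PySem.Str.join "\n" l = pvM l := by
  induction l with
  | nil => rfl
  | cons a t ih =>
      have ha : a ≠ "" := h a List.mem_cons_self
      have ht : ∀ s ∈ t, s ≠ "" := fun s hs => h s (List.mem_cons_of_mem _ hs)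
      cases t with
      | nil =>
          apply String.toList_inj.mp
          simp [PySem.Str.toList_join, PySem.Chars.join_singleton, pvM, pvGlue_empty_right]
      | cons b t' =>
          have hb : b ≠ "" := ht b List.mem_cons_self
          have hbt : pvM (b :: t') ≠ "" := by
            rw [show pvM (b :: t') = pvGlue b (pvM t') from rfl]
            exact pvGlue_ne_left b (pvM t') hb
          have hM : pvM (a :: b :: t') = pvGlue a (pvM (b :: t')) := rfl
          rw [hM]
          unfold pvGlue
          rw [if_neg ha, if_neg hbt, ← ih ht]
          apply String.toList_inj.mp
          simp [PySem.Str.toList_join, PySem.Chars.join_cons_cons, String.toList_append]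

theorem pv_alt_eq (rows : List (List (String × String))) :
    build_group_text_alt rows = pvM ((rows.map pvEntries).flatten) := by
  induction rows using build_group_text_alt.induct with
  | case1 => simp [build_group_text_alt, pvM]
  | case2 r =>
      simp only [build_group_text_alt, List.map_cons, List.map_nil, List.flatten_cons,
        List.flatten_nil, List.append_nil]
      unfold pvRowText
      rw [pv_rowText]
      simp [pvGlue]
  | case3 a b t rs mid ih1 ih2 =>
      simp only [build_group_text_alt]
      rw [ih1, ih2, ← pvM_append, ← List.flatten_append, ← List.map_append,
        List.take_append_drop]

-- ===== VERDICT (by name: the statement is the Claim_ definition above) =====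
theorem build_group_text_spec : Claim_equal_build_group_text := by
  intro rows _
  unfold Spec_build_group_text build_group_text
  rw [pv_outer_fold, List.nil_append, pv_alt_eq,
    pv_join_eq_M _ (by
      intro s hs
      rcases List.mem_flatten.mp hs with ⟨g, hg, hsg⟩
      rcases List.mem_map.mp hg with ⟨r, _, rfl⟩
      exact pv_entries_ne r s hsg)]
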